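-- pv_equiv track=rewrite | github.com/peter-k-1972/linux-desktop-ai-chat | app/ui_application/presenters/chat_stream_assembler.py | append_stream_piece
-- ===== SOURCE A (Python) =====
-- def append_stream_piece(full: str, piece: str) -> str:
--     """
--     Hängt einen Stream-Teil an und entfernt maximales Suffix/Präfix-Overlap.
--
--     Verhindert Duplikate wenn späterer ``message.content`` den bereits über
--     ``thinking`` gezeigten Text wiederholt, oder wenn ein Provider kumulative
--     statt strikt inkrementelle Blöcke sendet.
--     """
--     if not piece:
--         return full
--     if not full:
--         return piece
--     max_k = min(len(full), len(piece))
--     for k in range(max_k, 0, -1):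
--         if full.endswith(piece[:k]):
--             return full + piece[k:]
--     return full + piece
-- ===== SOURCE B (Python) =====
-- def append_stream_piece(full: str, piece: str) -> str:
--     if not piece:
--         return full
--     if not full:
--         return piece
--     MOD = (1 << 61) - 1
--     BASE = 257
--     max_k = min(len(full), len(piece))
--     # hp[k] = polynomial hash of piece[:k]
--     hp = [0]
--     for ch in piece[:max_k]:
--         hp.append((hp[-1] * BASE + ord(ch)) % MOD)
--     # hs[k] = polynomial hash of full[-k:] (built scanning full from the end)
--     hs = [0]
--     pw = 1
--     for ch in reversed(full[len(full) - max_k:]):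
--         hs.append((ord(ch) * pw + hs[-1]) % MOD)
--         pw = pw * BASE % MOD
--     for k in range(max_k, 0, -1):
--         if hs[k] == hp[k] and full.endswith(piece[:k]):
--             return full + piece[k:]
--     return full + piece
-- ===== Notes on version B (the rewrite author's own statement) =====
-- stated objective: faster
-- what changed: A tests each candidate overlap k (from max_k down) with full.endswith(piece[:k]), slicing O(k) per test (worst case quadratic); B precomputes rolling polynomial hashes of all piece-prefixes and full-suffixes in one linear pass each, filters every candidate k by an O(1) hash comparison, and slices/verifies only on a hash hit.
import Mathlib
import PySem

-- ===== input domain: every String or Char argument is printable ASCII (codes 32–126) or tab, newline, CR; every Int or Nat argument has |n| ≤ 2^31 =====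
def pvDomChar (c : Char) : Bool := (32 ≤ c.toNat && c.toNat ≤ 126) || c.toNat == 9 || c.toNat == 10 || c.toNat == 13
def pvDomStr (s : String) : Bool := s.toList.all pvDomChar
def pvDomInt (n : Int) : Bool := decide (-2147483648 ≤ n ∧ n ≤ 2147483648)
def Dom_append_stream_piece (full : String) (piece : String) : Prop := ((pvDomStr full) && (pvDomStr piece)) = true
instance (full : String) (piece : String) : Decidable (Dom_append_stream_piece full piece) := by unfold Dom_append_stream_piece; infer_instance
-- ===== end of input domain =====

set_option maxRecDepth 8192


-- B replaces A's descending `endswith(piece[:k])` scan (each test slices O(k)) by precomputed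
-- rolling hashes of piece-prefixes and full-suffixes, filtering each candidate k in O(1) and
-- slicing/comparing only on a hash hit; exact because equal strings have equal hashes and every
-- hash hit is still verified.

-- ===== PORT A =====
-- the 'for k in range(max_k, 0, -1): if full.endswith(piece[:k]): return full + piece[k:]' loop
def pvGoA (f p : List Char) : List Int → List Char
  | [] => f ++ p                                     -- loop fell through: return full + piece
  | k :: rest =>
    if PySem.Chars.endswith f (PySem.List.slice p none (some k)) then
      f ++ PySem.List.slice p (some k) none
    else pvGoA f p rest

def append_stream_piece (full : String) (piece : String) : String :=
  if piece.toList = [] then full                     -- if not piece: return full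
  else if full.toList = [] then piece                -- if not full: return piece
  else
    let f := full.toList
    let p := piece.toList
    let max_k : Int := min (f.length : Int) (p.length : Int)
    String.ofList (pvGoA f p (PySem.List.pyRange max_k 0 (-1)))

-- ===== PORT B =====
def pvMOD : Nat := 2305843009213693951               -- (1 << 61) - 1
def pvBASE : Nat := 257

-- the final 'for k in range(max_k, 0, -1): if hs[k] == hp[k] and full.endswith(piece[:k]): …' loop;
-- hs[k]/hp[k] are always in range, so Python's list indexing is ported with default 0 (never used)
def pvGoB (f p : List Char) (hs hp : List Nat) : List Int → List Char
  | [] => f ++ p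
  | k :: rest =>
    if (PySem.List.pyGetD hs k 0 == PySem.List.pyGetD hp k 0) &&
       PySem.Chars.endswith f (PySem.List.slice p none (some k)) then
      f ++ PySem.List.slice p (some k) none
    else pvGoB f p hs hp rest

def append_stream_piece_alt (full : String) (piece : String) : String :=
  if piece.toList = [] then full
  else if full.toList = [] then piece
  else
    let f := full.toList
    let p := piece.toList
    let max_k : Int := min (f.length : Int) (p.length : Int)
    -- hp = [0]; for ch in piece[:max_k]: hp.append((hp[-1]*BASE + ord(ch)) % MOD)
    let hp := (PySem.List.slice p none (some max_k)).foldl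
        (fun acc c => acc ++ [(acc.getLastD 0 * pvBASE + c.toNat) % pvMOD]) [0]
    -- hs = [0]; pw = 1; for ch in reversed(full[len(full)-max_k:]):
    --   hs.append((ord(ch)*pw + hs[-1]) % MOD); pw = pw * BASE % MOD
    let st := ((PySem.List.slice f (some ((f.length : Int) - max_k)) none).reverse).foldl
        (fun (st : List Nat × Nat) c =>
          (st.1 ++ [(c.toNat * st.2 + st.1.getLastD 0) % pvMOD], st.2 * pvBASE % pvMOD)) ([0], 1)
    String.ofList (pvGoB f p st.1 hp (PySem.List.pyRange max_k 0 (-1)))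

-- ===== PRECONDITION & SPEC =====
def Spec_append_stream_piece (full : String) (piece : String) (out : String) : Prop := out = append_stream_piece_alt full piece
instance (full : String) (piece : String) (out : String) : Decidable (Spec_append_stream_piece full piece out) := by unfold Spec_append_stream_piece; infer_instance

-- ===== CLAIM (what is proved, stated in full; the proofs are below) =====
def Claim_equal_append_stream_piece : Prop := ∀ (full : String) (piece : String), Dom_append_stream_piece full piece → Spec_append_stream_piece full piece (append_stream_piece full piece)

-- ===== LEMMAS AND PROOFS =====

-- the rolling polynomial hash both of B's tables tabulate
def pvHash (l : List Char) : Nat := l.foldl (fun a c => (a * pvBASE + c.toNat) % pvMOD) 0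

lemma pvMOD_pos : 0 < pvMOD := by norm_num [pvMOD]

lemma foldl_hash_lt (l : List Char) (h : l ≠ []) (a : Nat) :
    l.foldl (fun a c => (a * pvBASE + c.toNat) % pvMOD) a < pvMOD := by
  induction l generalizing a with
  | nil => exact absurd rfl h
  | cons c l ih =>
    cases l with
    | nil => exact Nat.mod_lt _ pvMOD_pos
    | cons d l => exact ih (List.cons_ne_nil _ _) _

lemma pvHash_lt (l : List Char) : pvHash l < pvMOD := by
  cases l with
  | nil => exact pvMOD_pos
  | cons c l => exact foldl_hash_lt _ (List.cons_ne_nil _ _) _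

lemma foldl_hash_mod (l : List Char) (a : Nat) :
    (l.foldl (fun a c => (a * pvBASE + c.toNat) % pvMOD) a) % pvMOD
      = (a * pvBASE ^ l.length + pvHash l) % pvMOD := by
  induction l generalizing a with
  | nil => simp [pvHash]
  | cons c l ih =>
    rw [List.foldl_cons, ih]
    have hc : pvHash (c :: l) % pvMOD
        = (c.toNat % pvMOD * pvBASE ^ l.length + pvHash l) % pvMOD := by
      have h2 := ih (c.toNat % pvMOD)
      have h3 : pvHash (c :: l)
          = l.foldl (fun a c => (a * pvBASE + c.toNat) % pvMOD) (c.toNat % pvMOD) := by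
        simp [pvHash]
      rw [h3]
      exact h2
    have e1 : (a * pvBASE + c.toNat) % pvMOD * pvBASE ^ l.length + pvHash l
        ≡ (a * pvBASE + c.toNat) * pvBASE ^ l.length + pvHash l [MOD pvMOD] :=
      Nat.ModEq.add_right _ (Nat.ModEq.mul_right _ (Nat.mod_modEq _ _))
    have e2 : pvHash (c :: l) ≡ c.toNat * pvBASE ^ l.length + pvHash l [MOD pvMOD] := by
      have : pvHash (c :: l) ≡ c.toNat % pvMOD * pvBASE ^ l.length + pvHash l [MOD pvMOD] := hc
      exact this.trans (Nat.ModEq.add_right _ (Nat.ModEq.mul_right _ (Nat.mod_modEq _ _)))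
    have e3 : (a * pvBASE + c.toNat) * pvBASE ^ l.length + pvHash l
        = a * pvBASE ^ (l.length + 1) + (c.toNat * pvBASE ^ l.length + pvHash l) := by ring
    calc ((a * pvBASE + c.toNat) % pvMOD * pvBASE ^ l.length + pvHash l) % pvMOD
        = ((a * pvBASE + c.toNat) * pvBASE ^ l.length + pvHash l) % pvMOD := e1
      _ = (a * pvBASE ^ (l.length + 1) + (c.toNat * pvBASE ^ l.length + pvHash l)) % pvMOD := by
          rw [e3]
      _ = (a * pvBASE ^ (l.length + 1) + pvHash (c :: l)) % pvMOD :=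
          (Nat.ModEq.add_left _ e2.symm)
      _ = (a * pvBASE ^ (c :: l).length + pvHash (c :: l)) % pvMOD := by
          simp
  -- the hc step: pvHash (c::l) % M via ih at a := c % M; the double-% collapses with mod_mod

lemma hash_prepend (c : Char) (l : List Char) :
    pvHash (c :: l) = (c.toNat * pvBASE ^ l.length + pvHash l) % pvMOD := by
  have h3 : pvHash (c :: l)
      = l.foldl (fun a c => (a * pvBASE + c.toNat) % pvMOD) (c.toNat % pvMOD) := by
    simp [pvHash]
  have h2 := foldl_hash_mod l (c.toNat % pvMOD)
  have e : pvHash (c :: l) % pvMOD = (c.toNat * pvBASE ^ l.length + pvHash l) % pvMOD := by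
    rw [h3, h2]
    exact Nat.ModEq.add_right _ (Nat.ModEq.mul_right _ (Nat.mod_modEq _ _))
  rw [Nat.mod_eq_of_lt (pvHash_lt _)] at e
  exact e

lemma hp_build (t : List Char) :
    t.foldl (fun acc c => acc ++ [(acc.getLastD 0 * pvBASE + c.toNat) % pvMOD]) [0]
      = (List.range (t.length + 1)).map (fun k => pvHash (t.take k)) := by
  induction t using List.reverseRecOn with
  | nil => simp [pvHash]
  | append_singleton t c ih =>
    rw [List.foldl_append, List.foldl_cons, List.foldl_nil, ih]
    have hlast : ((List.range (t.length + 1)).map (fun k => pvHash (t.take k))).getLastD 0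
        = pvHash t := by
      rw [List.range_succ, List.map_append]
      simp
    rw [hlast]
    have hlen : (t ++ [c]).length = t.length + 1 := by simp
    rw [hlen, List.range_succ (n := t.length + 1), List.map_append]
    congr 1
    · apply List.map_congr_left
      intro k hk
      rw [List.mem_range] at hk
      rw [List.take_append_of_le_length (by omega)]
    · simp only [List.map_cons, List.map_nil]
      congr 1
      rw [show t.length + 1 = (t ++ [c]).length from by simp, List.take_length]
      simp [pvHash, List.foldl_append]

lemma hs_build (u : List Char) :
    u.foldl (fun (st : List Nat × Nat) c =>
        (st.1 ++ [(c.toNat * st.2 + st.1.getLastD 0) % pvMOD], st.2 * pvBASE % pvMOD)) ([0], 1)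
      = ((List.range (u.length + 1)).map (fun k => pvHash ((u.take k).reverse)),
         pvBASE ^ u.length % pvMOD) := by
  induction u using List.reverseRecOn with
  | nil =>
    have h1 : (1 : Nat) % pvMOD = 1 := Nat.mod_eq_of_lt (by norm_num [pvMOD])
    simp [pvHash, h1]
  | append_singleton u c ih =>
    rw [List.foldl_append, List.foldl_cons, List.foldl_nil, ih]
    have hlast : ((List.range (u.length + 1)).map (fun k => pvHash ((u.take k).reverse))).getLastD 0
        = pvHash u.reverse := by
      rw [List.range_succ, List.map_append]
      simp
    have hlen : (u ++ [c]).length = u.length + 1 := by simp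
    refine Prod.ext ?_ ?_
    · simp only [hlast, hlen]
      rw [List.range_succ (n := u.length + 1), List.map_append]
      congr 1
      · apply List.map_congr_left
        intro k hk
        rw [List.mem_range] at hk
        rw [List.take_append_of_le_length (by omega)]
      · simp only [List.map_cons, List.map_nil]
        congr 1
        rw [show u.length + 1 = (u ++ [c]).length from by simp, List.take_length,
          List.reverse_append]
        simp only [List.reverse_cons, List.reverse_nil, List.nil_append, List.singleton_append]
        rw [hash_prepend, List.length_reverse]
        exact Nat.ModEq.add_right _ (Nat.ModEq.mul_left _ (Nat.mod_modEq _ _))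
    · simp only [hlen]
      rw [pow_succ]
      exact Nat.mod_mul_mod _ _ _
  -- step: new hash cell is pvHash (c :: u.reverse) by hash_prepend, with pw ≡ BASE^n

lemma suffix_drop_eq {s f : List Char} (h : s <:+ f) : f.drop (f.length - s.length) = s := by
  obtain ⟨t, rfl⟩ := h
  have hl : (t ++ s).length - s.length = t.length := by simp
  rw [hl, List.drop_left]

lemma go_eq (f p : List Char) (hs hp : List Nat) (M : Nat)
    (hyp : ∀ kn : Nat, 0 < kn → kn ≤ M →
      PySem.Chars.endswith f (PySem.List.slice p none (some (kn : Int))) = true →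
      hs.getD kn 0 = hp.getD kn 0) :
    ∀ ks : List Int, (∀ k ∈ ks, 0 < k ∧ k ≤ (M : Int)) →
      pvGoA f p ks = pvGoB f p hs hp ks := by
  intro ks
  induction ks with
  | nil => intro _; simp [pvGoA, pvGoB]
  | cons k rest ih =>
    intro hb
    obtain ⟨hk0, hkM⟩ := hb k (by simp)
    obtain ⟨kn, rfl⟩ : ∃ kn : Nat, k = (kn : Int) :=
      ⟨k.toNat, (Int.toNat_of_nonneg hk0.le).symm⟩
    have hsl : PySem.List.slice p none (some (kn : Int)) = p.take kn :=
      PySem.List.slice_to_natCast p kn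
    by_cases hE : PySem.Chars.endswith f (PySem.List.slice p none (some (kn : Int))) = true
    · have heq : hs.getD kn 0 = hp.getD kn 0 :=
        hyp kn (by omega) (by omega) hE
      have heq' : hs[kn]?.getD 0 = hp[kn]?.getD 0 := by
        simpa [List.getD_eq_getElem?_getD] using heq
      have hEt : PySem.Chars.endswith f (p.take kn) = true := by rwa [hsl] at hE
      simp [pvGoA, pvGoB, hEt, PySem.List.pyGetD_natCast, List.getD_eq_getElem?_getD, heq']
    · have hEf : PySem.Chars.endswith f (p.take kn) = false := by
        rw [← hsl]
        simpa using hE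
      simp [pvGoA, pvGoB, PySem.List.pyGetD_natCast, hsl, hEf]
      exact ih (fun k hk => hb k (List.mem_cons_of_mem _ hk))

-- ===== VERDICT (by name: the statement is the Claim_ definition above) =====
theorem append_stream_piece_spec : Claim_equal_append_stream_piece := by
  intro full piece _
  unfold Spec_append_stream_piece append_stream_piece append_stream_piece_alt
  by_cases hpE : piece.toList = []
  · simp [hpE]
  · by_cases hfE : full.toList = []
    · simp [hpE, hfE]
    · simp only [hpE, hfE, if_false]
      set f := full.toList with hf
      set p := piece.toList with hp
      set n := f.length with hn
      set m := p.length with hm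
      have hcast : min (n : Int) (m : Int) = ((min n m : Nat) : Int) := by
        simp [Nat.cast_min]
      set M : Nat := min n m with hM
      have hMn : M ≤ n := Nat.min_le_left _ _
      have hMm : M ≤ m := Nat.min_le_right _ _
      rw [hcast]
      have hslice1 : PySem.List.slice p none (some ((M : Nat) : Int)) = p.take M :=
        PySem.List.slice_to_natCast p M
      have hsub : (n : Int) - (M : Nat) = ((n - M : Nat) : Int) := by omega
      have hslice2 : PySem.List.slice f (some ((n : Int) - (M : Nat))) none = f.drop (n - M) := by
        rw [hsub]
        exact PySem.List.slice_from_natCast f (n - M)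
      rw [hslice1, hslice2, hp_build, hs_build]
      dsimp only
      congr 1
      refine go_eq f p _ _ M ?_ _ ?_
      · -- the hash-agreement hypothesis
        intro kn hk0 hkM hE
        have hlen_u : ((f.drop (n - M)).reverse).length = M := by
          simp [hn]
          omega
        have hlen_t : (p.take M).length = M := by
          simp
          omega
        have hsfx : p.take kn <:+ f := by
          have := (PySem.Chars.endswith_iff f (PySem.List.slice p none (some (kn : Int)))).mp hE
          rwa [PySem.List.slice_to_natCast] at this
        have hlenk : (p.take kn).length = kn := by
          simp
          omega
        have hdrop : f.drop (n - kn) = p.take kn := by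
          have := suffix_drop_eq hsfx
          rwa [hlenk, ← hn] at this
        rw [hlen_u, hlen_t]
        have h1 : (List.range (M + 1))[kn]? = some kn := by
          have hlt : kn < (List.range (M + 1)).length := by
            simp
            omega
          rw [List.getElem?_eq_getElem hlt, List.getElem_range]
        rw [List.getD_eq_getElem?_getD, List.getD_eq_getElem?_getD, List.getElem?_map,
          List.getElem?_map, h1]
        simp only [Option.map_some, Option.getD_some]
        have hrev : (((f.drop (n - M)).reverse).take kn).reverse
            = f.drop (n - kn) := by
          rw [List.take_reverse, List.reverse_reverse, List.drop_drop]
          congr 1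
          simp [hn]
          omega
        rw [hrev, hdrop, List.take_take, min_eq_left hkM]
      · -- bounds on the range values
        intro k hk
        rw [PySem.List.mem_pyRange_neg_one] at hk
        exact ⟨hk.1, hk.2⟩
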